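-- pv_equiv track=rewrite | github.com/AhmedHani/nlpeus | utils/text_utils.py | replace_apostrophes
-- ===== SOURCE A (Python) =====
-- from functools import reduce
--
-- def replace_apostrophes(text):
--     apostrophes_mapping = {
--         '\'s': ' is',
--         '\'ve': ' have',
--         'n\'t': ' not',
--         '\'d': ' would',
--         '\'m': ' am',
--         '\'ll': ' will',
--         '\'re': ' are'
--     }
--
--     # elegant! https://stackoverflow.com/a/9479972
--     if isinstance(text, list):
--         return [reduce(lambda a, kv: a.replace(*kv), apostrophes_mapping.items(), s) for s in text]
--
--     return reduce(lambda a, kv: a.replace(*kv), apostrophes_mapping.items(), text)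
-- ===== SOURCE B (Python) =====
-- import re
-- from functools import reduce  # module-level import kept from A's module
--
-- _APOSTROPHES_MAPPING = {
--     '\'s': ' is',
--     '\'ve': ' have',
--     'n\'t': ' not',
--     '\'d': ' would',
--     '\'m': ' am',
--     '\'ll': ' will',
--     '\'re': ' are'
-- }
-- _PATTERN = re.compile('|'.join(re.escape(k) for k in _APOSTROPHES_MAPPING))
--
--
-- def replace_apostrophes(text):
--     if isinstance(text, list):
--         return [_PATTERN.sub(lambda m: _APOSTROPHES_MAPPING[m.group(0)], s) for s in text]
--
--     return _PATTERN.sub(lambda m: _APOSTROPHES_MAPPING[m.group(0)], text)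
-- ===== Notes on version B (the rewrite author's own statement) =====
-- stated objective: idiomatic
-- what changed: A makes seven sequential full-string .replace passes (one per contraction); B compiles a single alternation regex over the seven keys and substitutes via the mapping table in one left-to-right pass.
import Mathlib
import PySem

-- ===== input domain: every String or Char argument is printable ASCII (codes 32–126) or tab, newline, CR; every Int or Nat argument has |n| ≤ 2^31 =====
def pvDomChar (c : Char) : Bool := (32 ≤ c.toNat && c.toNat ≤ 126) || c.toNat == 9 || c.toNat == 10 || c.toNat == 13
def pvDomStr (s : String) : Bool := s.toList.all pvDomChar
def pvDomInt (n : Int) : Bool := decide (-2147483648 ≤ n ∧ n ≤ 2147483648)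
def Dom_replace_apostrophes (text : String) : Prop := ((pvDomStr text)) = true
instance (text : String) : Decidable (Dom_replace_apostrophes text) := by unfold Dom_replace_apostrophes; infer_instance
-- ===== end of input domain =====

-- B replaces A's seven sequential full-string .replace passes by one single left-to-right
-- scan (a compiled alternation regex in Python's Source B); equivalence of return values is proved below.


-- ===== PORT A =====
-- reduce(lambda a, kv: a.replace(*kv), apostrophes_mapping.items(), text).
-- text : String here, so the isinstance(text, list) branch of A is dead code for this signature.
def replace_apostrophes (text : String) : String :=
  let apostrophes_mapping : PySem.Dict String String :=
    PySem.Dict.ofList [("'s", " is"), ("'ve", " have"), ("n't", " not"),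
                       ("'d", " would"), ("'m", " am"), ("'ll", " will"), ("'re", " are")]
  apostrophes_mapping.items.foldl (fun a kv => PySem.Str.replace a kv.1 kv.2) text

-- ===== PORT B =====
-- Source B compiles the alternation "'s|'ve|n't|'d|'m|'ll|'re" and substitutes via the mapping in ONE pass.
-- Exact port of re.sub's semantics for this pattern: scan left to right; at each position try the
-- alternatives in pattern order; on a match emit the mapped expansion and continue after the match.
def pvContractionTable : List (List Char × List Char) :=
  [(['\'', 's'], [' ', 'i', 's']),
   (['\'', 'v', 'e'], [' ', 'h', 'a', 'v', 'e']),
   (['n', '\'', 't'], [' ', 'n', 'o', 't']),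
   (['\'', 'd'], [' ', 'w', 'o', 'u', 'l', 'd']),
   (['\'', 'm'], [' ', 'a', 'm']),
   (['\'', 'l', 'l'], [' ', 'w', 'i', 'l', 'l']),
   (['\'', 'r', 'e'], [' ', 'a', 'r', 'e'])]

-- first alternative (in pattern order) matching at the current position, if any
def pvMatchAlt (l : List Char) : Option (List Char × List Char) :=
  pvContractionTable.find? (fun kv => kv.1.isPrefixOf l)

def pvSub : List Char → List Char
  | [] => []
  | c :: t =>
    match pvMatchAlt (c :: t) with
    | some kv => kv.2 ++ pvSub (t.drop (kv.1.length - 1))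
    | none => c :: pvSub t
termination_by l => l.length
decreasing_by
  all_goals simp

def replace_apostrophes_alt (text : String) : String := String.ofList (pvSub text.toList)

-- ===== PRECONDITION & SPEC =====
def Spec_replace_apostrophes (text : String) (out : String) : Prop := out = replace_apostrophes_alt text
instance (text : String) (out : String) : Decidable (Spec_replace_apostrophes text out) := by unfold Spec_replace_apostrophes; infer_instance

-- ===== CLAIM (what is proved, stated in full; the proofs are below) =====
def Claim_equal_replace_apostrophes : Prop := ∀ (text : String), Dom_replace_apostrophes text → Spec_replace_apostrophes text (replace_apostrophes text)

-- ===== LEMMAS AND PROOFS =====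

-- A clean recursive form of Python's str.replace (leftmost, non-overlapping), for nonempty `old`.
def pvRep (old new : List Char) : List Char → List Char
  | [] => []
  | c :: t =>
    if old ≠ [] ∧ old.isPrefixOf (c :: t) then new ++ pvRep old new (t.drop (old.length - 1))
    else c :: pvRep old new t
termination_by l => l.length
decreasing_by
  all_goals simp

lemma pvGo_eq (old new : List Char) (ho : old ≠ []) :
    ∀ (fuel : Nat) (l acc : List Char), l.length ≤ fuel →
      PySem.Chars.replace.go old new fuel l acc = acc.reverse ++ pvRep old new l := by
  intro fuel
  induction fuel with
  | zero =>
    intro l acc h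
    have : l = [] := by cases l <;> simp_all
    subst this
    simp [PySem.Chars.replace.go, pvRep]
  | succ n ih =>
    intro l acc h
    cases l with
    | nil => simp [PySem.Chars.replace.go, pvRep]
    | cons c t =>
      rw [PySem.Chars.replace.go]
      by_cases hp : old.isPrefixOf (c :: t)
      · simp only [hp, if_true]
        obtain ⟨a, old', rfl⟩ : ∃ a old', old = a :: old' := by
          cases old with | nil => exact absurd rfl ho | cons a o => exact ⟨a, o, rfl⟩
        have hlen : (List.drop (a :: old').length (c :: t)).length ≤ n := by
          simp at h ⊢; omega
        rw [ih _ _ hlen]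
        rw [pvRep]
        simp [hp, ho]
      · simp only [hp]
        have hlen : t.length ≤ n := by simp at h; omega
        rw [if_neg (by simp), ih _ _ hlen, pvRep]
        simp [hp]

lemma pvReplace_eq_rep (s old new : List Char) (ho : old ≠ []) :
    PySem.Chars.replace s old new = pvRep old new s := by
  rw [PySem.Chars.replace]
  simp [List.isEmpty_eq_false_iff.mpr ho, pvGo_eq old new ho s.length s [] le_rfl]

-- k never matches starting at any offset inside pre (a mismatch occurs already within pre)
def pvClash (k pre : List Char) : Prop :=
  ∀ o < pre.length, ∃ m, m < k.length ∧ o + m < pre.length ∧ k[m]? ≠ pre[o + m]?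

lemma pvClash_not_prefix {k pre : List Char} (hc : pvClash k pre)
    {o : Nat} (ho : o < pre.length) (w : List Char) :
    ¬ k.isPrefixOf (pre.drop o ++ w) := by
  rw [List.isPrefixOf_iff_prefix]
  rintro ⟨r, hr⟩
  obtain ⟨m, hm, hom, hne⟩ := hc o ho
  apply hne
  have h1 : (k ++ r)[m]? = k[m]? := List.getElem?_append_left hm
  have h2 : (pre.drop o ++ w)[m]? = pre[o + m]? := by
    rw [List.getElem?_append_left (by simp; omega), List.getElem?_drop]
  rw [← h1, hr, h2]

lemma pvClash_tail {k : List Char} {c : Char} {p : List Char} (hc : pvClash k (c :: p)) :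
    pvClash k p := by
  intro o ho
  obtain ⟨m, hm, hom, hne⟩ := hc (o + 1) (by simp; omega)
  exact ⟨m, hm, by simp at hom; omega, by simpa [Nat.add_right_comm] using hne⟩

lemma pvPass {k v : List Char} : ∀ {pre : List Char}, pvClash k pre →
    ∀ w, pvRep k v (pre ++ w) = pre ++ pvRep k v w := by
  intro pre
  induction pre with
  | nil => intro _ w; simp
  | cons c p ih =>
    intro hc w
    have hnp : ¬ k.isPrefixOf ((c :: p).drop 0 ++ w) := pvClash_not_prefix hc (by simp) w
    simp only [List.drop_zero] at hnp
    rw [List.cons_append, pvRep, if_neg (fun h => hnp h.2)]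
    rw [ih (pvClash_tail hc) w]; simp

lemma pvRep_self_prefix {k v : List Char} (hk : k ≠ []) (w : List Char) :
    pvRep k v (k ++ w) = v ++ pvRep k v w := by
  obtain ⟨a, k', rfl⟩ : ∃ a k', k = a :: k' := by
    cases k with | nil => exact absurd rfl hk | cons a o => exact ⟨a, o, rfl⟩
  rw [List.cons_append, pvRep]
  have hp : (a :: k').isPrefixOf (a :: (k' ++ w)) = true := by
    rw [List.isPrefixOf_iff_prefix]; exact ⟨w, by simp⟩
  simp only [hp, hk, ne_eq, not_false_iff, true_and, if_true, List.length_cons,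
    Nat.add_sub_cancel, List.drop_left]

-- u is t with (possibly) some non-overlapping keys already expanded; only the first
-- two characters matter for whether a key can match right after a fresh character.
def pvRel (t u : List Char) : Prop :=
  u.take 2 = t.take 2 ∨ u[0]? = some ' ' ∨ (u[0]? = t[0]? ∧ u[1]? = some ' ')

lemma pvRel_refl (t : List Char) : pvRel t t := Or.inl rfl

lemma pvRel_trans {t u w : List Char} (h1 : pvRel t u) (h2 : pvRel u w) : pvRel t w := by
  have g0 : ∀ (a b : List Char), a.take 2 = b.take 2 → a[0]? = b[0]? := by
    intro a b h
    have := congrArg (fun l => l[0]?) h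
    simpa using this
  have g1 : ∀ (a b : List Char), a.take 2 = b.take 2 → a[1]? = b[1]? := by
    intro a b h
    have := congrArg (fun l => l[1]?) h
    simpa using this
  rcases h1 with h1 | h1 | h1 <;> rcases h2 with h2 | h2 | h2
  · exact Or.inl (h2.trans h1)
  · exact Or.inr (Or.inl h2)
  · exact Or.inr (Or.inr ⟨h2.1.trans (g0 _ _ h1), h2.2⟩)
  · exact Or.inr (Or.inl ((g0 _ _ h2).trans h1))
  · exact Or.inr (Or.inl h2)
  · exact Or.inr (Or.inl (h2.1.trans h1))
  · exact Or.inr (Or.inr ⟨(g0 _ _ h2).trans h1.1, (g1 _ _ h2).trans h1.2⟩)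
  · exact Or.inr (Or.inl h2)
  · exact Or.inr (Or.inr ⟨h2.1.trans h1.1, h2.2⟩)

lemma pvRel_step {k v : List Char} (hk : k ≠ []) (hv : v[0]? = some ' ') (u : List Char) :
    pvRel u (pvRep k v u) := by
  cases u with
  | nil => rw [pvRep]; exact pvRel_refl []
  | cons c t =>
    rw [pvRep]
    by_cases hp : k.isPrefixOf (c :: t)
    · rw [if_pos ⟨hk, hp⟩]
      refine Or.inr (Or.inl ?_)
      cases v with
      | nil => simp at hv
      | cons v0 v' => simp at hv; simp [hv]
    · rw [if_neg (fun h => hp h.2)]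
      cases t with
      | nil => rw [pvRep]; exact pvRel_refl _
      | cons d t' =>
        rw [pvRep]
        by_cases hp2 : k.isPrefixOf (d :: t')
        · rw [if_pos ⟨hk, hp2⟩]
          refine Or.inr (Or.inr ⟨by simp, ?_⟩)
          cases v with
          | nil => simp at hv
          | cons v0 v' => simp at hv; simp [hv]
        · rw [if_neg (fun h => hp2 h.2)]
          exact Or.inl (by simp)

lemma pvNoPrefix_transfer {k : List Char} (hk2 : 2 ≤ k.length) (hk3 : k.length ≤ 3)
    (h1 : k[1]? ≠ some ' ') (h2 : k[2]? ≠ some ' ')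
    {t u : List Char} (hrel : pvRel t u) {c : Char}
    (h : ¬ k.isPrefixOf (c :: t)) : ¬ k.isPrefixOf (c :: u) := by
  rw [List.isPrefixOf_iff_prefix] at h ⊢
  intro hpre
  apply h
  match k, hk2, hk3 with
  | [a, b], _, _ =>
    obtain ⟨r, hr⟩ := hpre
    simp only [List.cons_append, List.cons.injEq] at hr
    obtain ⟨rfl, hr⟩ := hr
    have hu0 : u[0]? = some b := by rw [← hr]; simp
    rcases hrel with hrel | hrel | hrel
    · have : t[0]? = some b := by
        have := congrArg (fun l => l[0]?) hrel
        simp at this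
        rw [← this, hu0]
      obtain ⟨t0, t', rfl⟩ : ∃ t0 t', t = t0 :: t' := by
        cases t with | nil => simp at this | cons t0 t' => exact ⟨t0, t', rfl⟩
      simp at this
      subst this
      exact ⟨t', by simp⟩
    · rw [hrel] at hu0; simp at hu0; simp [← hu0] at h1
    · have : t[0]? = some b := hrel.1 ▸ hu0
      obtain ⟨t0, t', rfl⟩ : ∃ t0 t', t = t0 :: t' := by
        cases t with | nil => simp at this | cons t0 t' => exact ⟨t0, t', rfl⟩
      simp at this
      subst this
      exact ⟨t', by simp⟩
  | [a, b, e], _, _ =>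
    obtain ⟨r, hr⟩ := hpre
    simp only [List.cons_append, List.cons.injEq] at hr
    obtain ⟨rfl, hr⟩ := hr
    have hu0 : u[0]? = some b := by rw [← hr]; simp
    have hu1 : u[1]? = some e := by rw [← hr]; simp
    rcases hrel with hrel | hrel | hrel
    · have e0 : t[0]? = some b := by
        have := congrArg (fun l => l[0]?) hrel
        simp at this; rw [← this, hu0]
      have e1 : t[1]? = some e := by
        have := congrArg (fun l => l[1]?) hrel
        simp at this; rw [← this, hu1]
      obtain ⟨t0, t1, t', rfl⟩ : ∃ t0 t1 t', t = t0 :: t1 :: t' := by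
        cases t with
        | nil => simp at e0
        | cons t0 tt =>
          cases tt with
          | nil => simp at e1
          | cons t1 t' => exact ⟨t0, t1, t', rfl⟩
      simp at e0 e1
      subst e0; subst e1
      exact ⟨t', by simp⟩
    · rw [hrel] at hu0; simp at hu0; simp [← hu0] at h1
    · rw [hrel.2] at hu1; simp at hu1; simp [← hu1] at h2

def pvFold (T : List (List Char × List Char)) (l : List Char) : List Char :=
  T.foldl (fun a kv => pvRep kv.1 kv.2 a) l

def pvGood (kv : List Char × List Char) : Prop :=
  2 ≤ kv.1.length ∧ kv.1.length ≤ 3 ∧ kv.1[1]? ≠ some ' ' ∧ kv.1[2]? ≠ some ' ' ∧ kv.2[0]? = some ' '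

lemma pvFold_nomatch_aux {T : List (List Char × List Char)} (hT : ∀ kv ∈ T, pvGood kv)
    {c : Char} {t : List Char} (h : ∀ kv ∈ T, ¬ kv.1.isPrefixOf (c :: t)) :
    ∀ u, pvRel t u → pvFold T (c :: u) = c :: pvFold T u := by
  induction T with
  | nil => intro u _; rfl
  | cons kv T' ih =>
    intro u hrel
    obtain ⟨g1, g2, g3, g4, g5⟩ := hT kv (by simp)
    have hk : kv.1 ≠ [] := by intro hh; rw [hh] at g1; simp at g1
    have hnp : ¬ kv.1.isPrefixOf (c :: u) :=
      pvNoPrefix_transfer g1 g2 g3 g4 hrel (h kv (by simp))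
    have hstep : pvRep kv.1 kv.2 (c :: u) = c :: pvRep kv.1 kv.2 u := by
      rw [pvRep, if_neg (fun hh => hnp hh.2)]
    show pvFold T' (pvRep kv.1 kv.2 (c :: u)) = c :: pvFold T' (pvRep kv.1 kv.2 u)
    rw [hstep]
    exact ih (fun x hx => hT x (by simp [hx])) (fun x hx => h x (by simp [hx]))
      _ (pvRel_trans hrel (pvRel_step hk g5 u))

lemma pvFold_nomatch {T : List (List Char × List Char)} (hT : ∀ kv ∈ T, pvGood kv)
    {c : Char} {t : List Char} (h : ∀ kv ∈ T, ¬ kv.1.isPrefixOf (c :: t)) :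
    pvFold T (c :: t) = c :: pvFold T t :=
  pvFold_nomatch_aux hT h t (pvRel_refl t)

lemma pvFold_pass {T : List (List Char × List Char)} {pre : List Char}
    (hc : ∀ kv ∈ T, pvClash kv.1 pre) (w : List Char) :
    pvFold T (pre ++ w) = pre ++ pvFold T w := by
  induction T generalizing w with
  | nil => rfl
  | cons kv T' ih =>
    show pvFold T' (pvRep kv.1 kv.2 (pre ++ w)) = pre ++ pvFold T' (pvRep kv.1 kv.2 w)
    rw [pvPass (hc kv (by simp)) w]
    exact ih (fun x hx => hc x (by simp [hx])) _

lemma pvBranch {k v : List Char} {T1 T2 : List (List Char × List Char)}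
    (hsplit : pvContractionTable = T1 ++ (k, v) :: T2)
    (hk : k ≠ [])
    (h1 : ∀ kv ∈ T1, pvClash kv.1 k)
    (h2 : ∀ kv ∈ T2, pvClash kv.1 v) (rest : List Char) :
    pvFold pvContractionTable (k ++ rest) = v ++ pvFold pvContractionTable rest := by
  rw [hsplit]
  have e : ∀ l, pvFold (T1 ++ (k, v) :: T2) l = pvFold T2 (pvRep k v (pvFold T1 l)) := by
    intro l; simp [pvFold, List.foldl_append]
  rw [e, e, pvFold_pass h1, pvRep_self_prefix hk, pvFold_pass h2]

lemma pvMain_aux : ∀ (n : Nat) (l : List Char), l.length ≤ n →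
    pvFold pvContractionTable l = pvSub l := by
  intro n
  induction n with
  | zero =>
    intro l h
    have : l = [] := by cases l <;> simp_all
    subst this
    simp [pvFold, pvContractionTable, pvSub, pvRep]
  | succ n ih =>
    intro l h
    cases l with
    | nil => simp [pvFold, pvContractionTable, pvSub, pvRep]
    | cons c t =>
      cases hm : pvMatchAlt (c :: t) with
      | none =>
        have hall : ∀ kv ∈ pvContractionTable, ¬ kv.1.isPrefixOf (c :: t) := by
          simpa [pvMatchAlt, List.find?_eq_none] using hm
        rw [pvSub, hm]
        rw [pvFold_nomatch (by unfold pvGood; decide) hall, ih t (by simp at h; omega)]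
      | some kv =>
        rw [pvSub, hm]
        unfold pvMatchAlt at hm
        have hpre : kv.1 <+: c :: t := by simpa using List.find?_some hm
        have hmem := List.mem_of_find?_eq_some hm
        simp only [pvContractionTable, List.mem_cons, List.not_mem_nil, or_false] at hmem
        rcases hmem with rfl | rfl | rfl | rfl | rfl | rfl | rfl
        · obtain ⟨rest, hrest⟩ := hpre
          simp only [List.cons_append, List.nil_append, List.cons.injEq] at hrest
          obtain ⟨rfl, rfl⟩ : '\'' = c ∧ ('s' :: rest : List Char) = t := hrest
          have hlen : rest.length ≤ n := by simp at h; omega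
          show pvFold pvContractionTable (['\'', 's'] ++ rest) =
            [' ', 'i', 's'] ++ pvSub (('s' :: rest : List Char).drop (List.length (['\'', 's'] : List Char) - 1))
          rw [pvBranch (T1 := []) (T2 := [(['\'', 'v', 'e'], [' ', 'h', 'a', 'v', 'e']), (['n', '\'', 't'], [' ', 'n', 'o', 't']), (['\'', 'd'], [' ', 'w', 'o', 'u', 'l', 'd']), (['\'', 'm'], [' ', 'a', 'm']), (['\'', 'l', 'l'], [' ', 'w', 'i', 'l', 'l']), (['\'', 'r', 'e'], [' ', 'a', 'r', 'e'])]) rfl (by simp) (by unfold pvClash; decide) (by unfold pvClash; decide) rest]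
          simp only [List.length_cons, List.length_nil, List.drop_succ_cons, List.drop_zero]
          rw [ih rest hlen]
        · obtain ⟨rest, hrest⟩ := hpre
          simp only [List.cons_append, List.nil_append, List.cons.injEq] at hrest
          obtain ⟨rfl, rfl⟩ : '\'' = c ∧ ('v' :: 'e' :: rest : List Char) = t := hrest
          have hlen : rest.length ≤ n := by simp at h; omega
          show pvFold pvContractionTable (['\'', 'v', 'e'] ++ rest) =
            [' ', 'h', 'a', 'v', 'e'] ++ pvSub (('v' :: 'e' :: rest : List Char).drop (List.length (['\'', 'v', 'e'] : List Char) - 1))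
          rw [pvBranch (T1 := [(['\'', 's'], [' ', 'i', 's'])]) (T2 := [(['n', '\'', 't'], [' ', 'n', 'o', 't']), (['\'', 'd'], [' ', 'w', 'o', 'u', 'l', 'd']), (['\'', 'm'], [' ', 'a', 'm']), (['\'', 'l', 'l'], [' ', 'w', 'i', 'l', 'l']), (['\'', 'r', 'e'], [' ', 'a', 'r', 'e'])]) rfl (by simp) (by unfold pvClash; decide) (by unfold pvClash; decide) rest]
          simp only [List.length_cons, List.length_nil, List.drop_succ_cons, List.drop_zero]
          rw [ih rest hlen]
        · obtain ⟨rest, hrest⟩ := hpre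
          simp only [List.cons_append, List.nil_append, List.cons.injEq] at hrest
          obtain ⟨rfl, rfl⟩ : 'n' = c ∧ ('\'' :: 't' :: rest : List Char) = t := hrest
          have hlen : rest.length ≤ n := by simp at h; omega
          show pvFold pvContractionTable (['n', '\'', 't'] ++ rest) =
            [' ', 'n', 'o', 't'] ++ pvSub (('\'' :: 't' :: rest : List Char).drop (List.length (['n', '\'', 't'] : List Char) - 1))
          rw [pvBranch (T1 := [(['\'', 's'], [' ', 'i', 's']), (['\'', 'v', 'e'], [' ', 'h', 'a', 'v', 'e'])]) (T2 := [(['\'', 'd'], [' ', 'w', 'o', 'u', 'l', 'd']), (['\'', 'm'], [' ', 'a', 'm']), (['\'', 'l', 'l'], [' ', 'w', 'i', 'l', 'l']), (['\'', 'r', 'e'], [' ', 'a', 'r', 'e'])]) rfl (by simp) (by unfold pvClash; decide) (by unfold pvClash; decide) rest]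
          simp only [List.length_cons, List.length_nil, List.drop_succ_cons, List.drop_zero]
          rw [ih rest hlen]
        · obtain ⟨rest, hrest⟩ := hpre
          simp only [List.cons_append, List.nil_append, List.cons.injEq] at hrest
          obtain ⟨rfl, rfl⟩ : '\'' = c ∧ ('d' :: rest : List Char) = t := hrest
          have hlen : rest.length ≤ n := by simp at h; omega
          show pvFold pvContractionTable (['\'', 'd'] ++ rest) =
            [' ', 'w', 'o', 'u', 'l', 'd'] ++ pvSub (('d' :: rest : List Char).drop (List.length (['\'', 'd'] : List Char) - 1))
          rw [pvBranch (T1 := [(['\'', 's'], [' ', 'i', 's']), (['\'', 'v', 'e'], [' ', 'h', 'a', 'v', 'e']), (['n', '\'', 't'], [' ', 'n', 'o', 't'])]) (T2 := [(['\'', 'm'], [' ', 'a', 'm']), (['\'', 'l', 'l'], [' ', 'w', 'i', 'l', 'l']), (['\'', 'r', 'e'], [' ', 'a', 'r', 'e'])]) rfl (by simp) (by unfold pvClash; decide) (by unfold pvClash; decide) rest]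
          simp only [List.length_cons, List.length_nil, List.drop_succ_cons, List.drop_zero]
          rw [ih rest hlen]
        · obtain ⟨rest, hrest⟩ := hpre
          simp only [List.cons_append, List.nil_append, List.cons.injEq] at hrest
          obtain ⟨rfl, rfl⟩ : '\'' = c ∧ ('m' :: rest : List Char) = t := hrest
          have hlen : rest.length ≤ n := by simp at h; omega
          show pvFold pvContractionTable (['\'', 'm'] ++ rest) =
            [' ', 'a', 'm'] ++ pvSub (('m' :: rest : List Char).drop (List.length (['\'', 'm'] : List Char) - 1))
          rw [pvBranch (T1 := [(['\'', 's'], [' ', 'i', 's']), (['\'', 'v', 'e'], [' ', 'h', 'a', 'v', 'e']), (['n', '\'', 't'], [' ', 'n', 'o', 't']), (['\'', 'd'], [' ', 'w', 'o', 'u', 'l', 'd'])]) (T2 := [(['\'', 'l', 'l'], [' ', 'w', 'i', 'l', 'l']), (['\'', 'r', 'e'], [' ', 'a', 'r', 'e'])]) rfl (by simp) (by unfold pvClash; decide) (by unfold pvClash; decide) rest]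
          simp only [List.length_cons, List.length_nil, List.drop_succ_cons, List.drop_zero]
          rw [ih rest hlen]
        · obtain ⟨rest, hrest⟩ := hpre
          simp only [List.cons_append, List.nil_append, List.cons.injEq] at hrest
          obtain ⟨rfl, rfl⟩ : '\'' = c ∧ ('l' :: 'l' :: rest : List Char) = t := hrest
          have hlen : rest.length ≤ n := by simp at h; omega
          show pvFold pvContractionTable (['\'', 'l', 'l'] ++ rest) =
            [' ', 'w', 'i', 'l', 'l'] ++ pvSub (('l' :: 'l' :: rest : List Char).drop (List.length (['\'', 'l', 'l'] : List Char) - 1))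
          rw [pvBranch (T1 := [(['\'', 's'], [' ', 'i', 's']), (['\'', 'v', 'e'], [' ', 'h', 'a', 'v', 'e']), (['n', '\'', 't'], [' ', 'n', 'o', 't']), (['\'', 'd'], [' ', 'w', 'o', 'u', 'l', 'd']), (['\'', 'm'], [' ', 'a', 'm'])]) (T2 := [(['\'', 'r', 'e'], [' ', 'a', 'r', 'e'])]) rfl (by simp) (by unfold pvClash; decide) (by unfold pvClash; decide) rest]
          simp only [List.length_cons, List.length_nil, List.drop_succ_cons, List.drop_zero]
          rw [ih rest hlen]
        · obtain ⟨rest, hrest⟩ := hpre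
          simp only [List.cons_append, List.nil_append, List.cons.injEq] at hrest
          obtain ⟨rfl, rfl⟩ : '\'' = c ∧ ('r' :: 'e' :: rest : List Char) = t := hrest
          have hlen : rest.length ≤ n := by simp at h; omega
          show pvFold pvContractionTable (['\'', 'r', 'e'] ++ rest) =
            [' ', 'a', 'r', 'e'] ++ pvSub (('r' :: 'e' :: rest : List Char).drop (List.length (['\'', 'r', 'e'] : List Char) - 1))
          rw [pvBranch (T1 := [(['\'', 's'], [' ', 'i', 's']), (['\'', 'v', 'e'], [' ', 'h', 'a', 'v', 'e']), (['n', '\'', 't'], [' ', 'n', 'o', 't']), (['\'', 'd'], [' ', 'w', 'o', 'u', 'l', 'd']), (['\'', 'm'], [' ', 'a', 'm']), (['\'', 'l', 'l'], [' ', 'w', 'i', 'l', 'l'])]) (T2 := []) rfl (by simp) (by unfold pvClash; decide) (by unfold pvClash; decide) rest]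
          simp only [List.length_cons, List.length_nil, List.drop_succ_cons, List.drop_zero]
          rw [ih rest hlen]

-- ===== VERDICT (by name: the statement is the Claim_ definition above) =====
theorem replace_apostrophes_spec : Claim_equal_replace_apostrophes := by
  unfold Claim_equal_replace_apostrophes
  intro text _
  unfold Spec_replace_apostrophes
  rw [← String.toList_inj]
  have hB : (replace_apostrophes_alt text).toList = pvSub text.toList := by
    unfold replace_apostrophes_alt; exact String.toList_ofList
  have e1 : replace_apostrophes text = PySem.Str.replace (PySem.Str.replace (PySem.Str.replace (PySem.Str.replace (PySem.Str.replace (PySem.Str.replace (PySem.Str.replace (text) "'s" " is") "'ve" " have") "n't" " not") "'d" " would") "'m" " am") "'ll" " will") "'re" " are" := rfl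
  have r1 : ∀ s, PySem.Chars.replace s "'s".toList " is".toList = pvRep ['\'', 's'] [' ', 'i', 's'] s := by
    intro s
    rw [pvReplace_eq_rep s _ _ (by decide), show "'s".toList = ['\'', 's'] from by decide,
        show " is".toList = [' ', 'i', 's'] from by decide]
  have r2 : ∀ s, PySem.Chars.replace s "'ve".toList " have".toList = pvRep ['\'', 'v', 'e'] [' ', 'h', 'a', 'v', 'e'] s := by
    intro s
    rw [pvReplace_eq_rep s _ _ (by decide), show "'ve".toList = ['\'', 'v', 'e'] from by decide,
        show " have".toList = [' ', 'h', 'a', 'v', 'e'] from by decide]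
  have r3 : ∀ s, PySem.Chars.replace s "n't".toList " not".toList = pvRep ['n', '\'', 't'] [' ', 'n', 'o', 't'] s := by
    intro s
    rw [pvReplace_eq_rep s _ _ (by decide), show "n't".toList = ['n', '\'', 't'] from by decide,
        show " not".toList = [' ', 'n', 'o', 't'] from by decide]
  have r4 : ∀ s, PySem.Chars.replace s "'d".toList " would".toList = pvRep ['\'', 'd'] [' ', 'w', 'o', 'u', 'l', 'd'] s := by
    intro s
    rw [pvReplace_eq_rep s _ _ (by decide), show "'d".toList = ['\'', 'd'] from by decide,
        show " would".toList = [' ', 'w', 'o', 'u', 'l', 'd'] from by decide]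
  have r5 : ∀ s, PySem.Chars.replace s "'m".toList " am".toList = pvRep ['\'', 'm'] [' ', 'a', 'm'] s := by
    intro s
    rw [pvReplace_eq_rep s _ _ (by decide), show "'m".toList = ['\'', 'm'] from by decide,
        show " am".toList = [' ', 'a', 'm'] from by decide]
  have r6 : ∀ s, PySem.Chars.replace s "'ll".toList " will".toList = pvRep ['\'', 'l', 'l'] [' ', 'w', 'i', 'l', 'l'] s := by
    intro s
    rw [pvReplace_eq_rep s _ _ (by decide), show "'ll".toList = ['\'', 'l', 'l'] from by decide,
        show " will".toList = [' ', 'w', 'i', 'l', 'l'] from by decide]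
  have r7 : ∀ s, PySem.Chars.replace s "'re".toList " are".toList = pvRep ['\'', 'r', 'e'] [' ', 'a', 'r', 'e'] s := by
    intro s
    rw [pvReplace_eq_rep s _ _ (by decide), show "'re".toList = ['\'', 'r', 'e'] from by decide,
        show " are".toList = [' ', 'a', 'r', 'e'] from by decide]
  have hA : (replace_apostrophes text).toList = pvFold pvContractionTable text.toList := by
    rw [e1]
    simp only [PySem.Str.toList_replace, r1, r2, r3, r4, r5, r6, r7]
    simp [pvFold, pvContractionTable]
  rw [hA, hB]
  exact pvMain_aux text.toList.length text.toList le_rfl
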